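-- pv_equiv track=rewrite | github.com/Heejae-J-Lee/TIL | Coding Test/programmers/[PCCP 기출문제] 2번.py | solution
-- ===== SOURCE A (Python) =====
-- dx = [1, -1, 0, 0]
--
-- dy = [0, 0, 1, -1]
--
-- def solution(land):
--     answer = 0
--
--     depth = len(land)
--     size = len(land[0])
--
--     amount_of_oil = [0 for _ in range(size)]
--
--     for i in range(size):
--         for j in range(depth):
--             rows = set()
--             next_blocks = []
--             oils = 0
--             if land[j][i] != 0:
--                 next_blocks.append((j,i))
--                 land[j][i] = 0
--                 rows.add(i)
--                 oils += 1
--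
--             while (len(next_blocks)!=0):
--                 block = next_blocks[0]
--                 next_blocks.pop(0)
--
--                 for d in range(4):
--                     next_row = block[1] + dx[d]
--                     next_depth = block[0] + dy[d]
--
--                     if next_row < 0 or size <= next_row or next_depth < 0 or depth <= next_depth:
--                         continue
--
--                     if land[next_depth][next_row] != 0:
--                         next_blocks.append((next_depth,next_row))
--                         land[next_depth][next_row] = 0
--                         rows.add(next_row)
--                         oils += 1
--             for row in rows:
--                 amount_of_oil[row] += oils
--
--     answer = max(amount_of_oil)
--
--     return answer
-- ===== SOURCE B (Python) =====
-- def solution(land):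
--     # Equivalence is about the return value only: A zeroes land in place, B leaves it untouched.
--     depth = len(land)
--     size = len(land[0])
--     seen = set()
--     totals = [0] * size
--     for i in range(size):
--         for j in range(depth):
--             if land[j][i] == 0 or (j, i) in seen:
--                 continue
--             comp = [(j, i)]
--             seen.add((j, i))
--             head = 0
--             while head < len(comp):
--                 r, c = comp[head]
--                 head += 1
--                 for nr, nc in ((r, c + 1), (r, c - 1), (r + 1, c), (r - 1, c)):
--                     if 0 <= nr < depth and 0 <= nc < size \
--                             and land[nr][nc] != 0 and (nr, nc) not in seen:
--                         seen.add((nr, nc))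
--                         comp.append((nr, nc))
--             for c in {c for _, c in comp}:
--                 totals[c] += len(comp)
--     return max(totals)
-- ===== Notes on version B (the rewrite author's own statement) =====
-- stated objective: alternative
-- what changed: B replaces A's destructive flood fill (zeroing the grid in place, O(k) pop(0) queue, per-cell column-set updates) with a non-destructive one: a global visited set, a component list grown and scanned with a cursor (O(1) dequeue), and the column set derived from the finished component; B does not mutate land.
import Mathlib
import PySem

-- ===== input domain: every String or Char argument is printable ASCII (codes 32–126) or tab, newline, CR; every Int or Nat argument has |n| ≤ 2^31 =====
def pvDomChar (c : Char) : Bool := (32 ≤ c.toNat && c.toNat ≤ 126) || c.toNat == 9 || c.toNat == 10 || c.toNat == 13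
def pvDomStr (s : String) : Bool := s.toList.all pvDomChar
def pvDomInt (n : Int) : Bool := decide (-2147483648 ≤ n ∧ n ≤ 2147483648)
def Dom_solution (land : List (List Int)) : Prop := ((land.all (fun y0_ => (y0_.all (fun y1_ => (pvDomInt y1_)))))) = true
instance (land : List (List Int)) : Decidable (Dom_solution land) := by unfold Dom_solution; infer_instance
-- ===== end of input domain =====

-- B replaces A's destructive flood fill (zeroing the grid, O(k) queue pops via pop(0), a per-component
-- column set updated cell by cell) by a non-destructive one: a global visited set, a grown component list
-- scanned with a cursor, and the column set derived from the finished component.  A mutates `land` to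
-- zeros in place, B leaves it untouched: the equivalence proved here is about the RETURN value only.

-- ===== PORT A =====
-- land[j][i] (total form; every access is in range for inputs satisfying Pre_solution)
def pvCell (g : List (List Int)) (j i : Int) : Int :=
  PySem.List.pyGetD (PySem.List.pyGetD g j []) i 0

-- land[j][i] = 0
def pvZero (g : List (List Int)) (j i : Int) : List (List Int) :=
  PySem.List.pySetD g j (PySem.List.pySetD (PySem.List.pyGetD g j []) i 0)

-- (dx[d], dy[d]) for d in range(4)
def pvDxDy : List (Int × Int) := [(1, 0), (-1, 0), (0, 1), (0, -1)]

-- body of A's `for d in range(4)` loop; state = (land, next_blocks, rows, oils)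
def pvStepA (size depth : Int) (block : Int × Int)
    (st : List (List Int) × List (Int × Int) × PySem.Set Int × Int) (d : Int × Int) :
    List (List Int) × List (Int × Int) × PySem.Set Int × Int :=
  let nr := block.2 + d.1
  let nd := block.1 + d.2
  if nr < 0 ∨ size ≤ nr ∨ nd < 0 ∨ depth ≤ nd then st
  else if pvCell st.1 nd nr ≠ 0 then
    (pvZero st.1 nd nr, st.2.1 ++ [(nd, nr)], PySem.Set.add st.2.2.1 nr, st.2.2.2 + 1)
  else st

-- A's `while next_blocks` loop (the fuel only makes it total; it never runs out on a real run)
def pvWhileA (size depth : Int) : Nat → List (List Int) × List (Int × Int) × PySem.Set Int × Int →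
    List (List Int) × PySem.Set Int × Int
  | 0, st => (st.1, st.2.2)
  | fuel + 1, st =>
    match st.2.1 with
    | [] => (st.1, st.2.2)
    | block :: rest =>
      pvWhileA size depth fuel (pvDxDy.foldl (pvStepA size depth block) (st.1, rest, st.2.2.1, st.2.2.2))

-- body of A's inner `for j in range(depth)` loop; state = (land, amount_of_oil).
-- `for row in rows: amount_of_oil[row] += oils` iterates a Python set; the fold below follows the
-- set's insertion order, which is exact here because the updates hit distinct indices and commute.
def pvBodyA (size depth : Int) (fuel : Nat) (i : Int)
    (st : List (List Int) × List Int) (j : Int) : List (List Int) × List Int :=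
  let seed := if pvCell st.1 j i ≠ 0
    then (pvZero st.1 j i, [(j, i)], PySem.Set.add PySem.Set.empty i, (1 : Int))
    else (st.1, ([] : List (Int × Int)), (PySem.Set.empty : PySem.Set Int), (0 : Int))
  let r := pvWhileA size depth fuel seed
  (r.1, r.2.1.foldl (fun a row => PySem.List.pySetD a row (PySem.List.pyGetD a row 0 + r.2.2)) st.2)

def solution (land : List (List Int)) : Int :=
  let depth : Int := land.length
  let size : Int := (PySem.List.pyGetD land 0 []).length
  let fuel : Nat := land.length * (PySem.List.pyGetD land 0 []).length + 1
  let res := (PySem.List.pyRange 0 size 1).foldl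
    (fun st i => (PySem.List.pyRange 0 depth 1).foldl (pvBodyA size depth fuel i) st)
    (land, List.replicate (PySem.List.pyGetD land 0 []).length (0 : Int))
  (PySem.List.max? res.2 (fun x => x)).getD 0  -- max(amount_of_oil); nonempty under Pre_solution

-- ===== PORT B =====
-- land[p[0]][p[1]] on the original, never-mutated grid
def pvAt (land : List (List Int)) (p : Int × Int) : Int :=
  PySem.List.pyGetD (PySem.List.pyGetD land p.1 []) p.2 0

-- ((r, c+1), (r, c-1), (r+1, c), (r-1, c))
def pvNbrs (r c : Int) : List (Int × Int) := [(r, c + 1), (r, c - 1), (r + 1, c), (r - 1, c)]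

-- body of B's `for nr, nc in …` loop; state = (seen, comp)
def pvStepB (land : List (List Int)) (size depth : Int)
    (st : PySem.Set (Int × Int) × List (Int × Int)) (p : Int × Int) :
    PySem.Set (Int × Int) × List (Int × Int) :=
  if (0 ≤ p.1 ∧ p.1 < depth ∧ 0 ≤ p.2 ∧ p.2 < size) ∧
      pvAt land p ≠ 0 ∧ ¬ PySem.Set.contains st.1 p
  then (PySem.Set.add st.1 p, st.2 ++ [p]) else st

-- B's `while head < len(comp)` cursor loop (fuel only makes it total)
def pvWhileB (land : List (List Int)) (size depth : Int) :
    Nat → PySem.Set (Int × Int) × List (Int × Int) → Nat → PySem.Set (Int × Int) × List (Int × Int)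
  | 0, st, _ => st
  | fuel + 1, st, head =>
    if head < st.2.length then
      let b := st.2.getD head ((0 : Int), (0 : Int))  -- comp[head]; in range by the guard
      pvWhileB land size depth fuel ((pvNbrs b.1 b.2).foldl (pvStepB land size depth) st) (head + 1)
    else st

-- body of B's inner `for j` loop; state = (seen, totals).
-- `for c in {c for _, c in comp}` iterates a Python set; the fold follows insertion order,
-- exact here because the updates hit distinct indices and commute.
def pvBodyB (land : List (List Int)) (size depth : Int) (fuel : Nat) (i : Int)
    (st : PySem.Set (Int × Int) × List Int) (j : Int) : PySem.Set (Int × Int) × List Int :=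
  if pvAt land (j, i) = 0 ∨ PySem.Set.contains st.1 (j, i) then st
  else
    let r := pvWhileB land size depth fuel (PySem.Set.add st.1 (j, i), [(j, i)]) 0
    (r.1, (PySem.Set.ofList (r.2.map Prod.snd)).foldl
      (fun a c => PySem.List.pySetD a c (PySem.List.pyGetD a c 0 + (r.2.length : Int))) st.2)

def solution_alt (land : List (List Int)) : Int :=
  let depth : Int := land.length
  let size : Int := (PySem.List.pyGetD land 0 []).length
  let fuel : Nat := land.length * (PySem.List.pyGetD land 0 []).length + 1
  let res := (PySem.List.pyRange 0 size 1).foldl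
    (fun st i => (PySem.List.pyRange 0 depth 1).foldl (pvBodyB land size depth fuel i) st)
    ((PySem.Set.empty : PySem.Set (Int × Int)), List.replicate (PySem.List.pyGetD land 0 []).length (0 : Int))
  (PySem.List.max? res.2 (fun x => x)).getD 0  -- max(totals); nonempty under Pre_solution

-- ===== PRECONDITION & SPEC =====
-- A raises IndexError on empty input and whenever some row is shorter than the first row,
-- and ValueError (max of an empty list) when the first row is empty;
-- Pre_solution excludes exactly those inputs (B raises there as well).
def Pre_solution (land : List (List Int)) : Prop :=
  land ≠ [] ∧ (land.headD []).length ≠ 0 ∧ ∀ row ∈ land, (land.headD []).length ≤ row.length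
instance (land : List (List Int)) : Decidable (Pre_solution land) := by unfold Pre_solution; infer_instance
def pvWitness_solution : List (List Int) := [[1, 0], [0, 2]]
def Spec_solution (land : List (List Int)) (out : Int) : Prop := out = solution_alt land
instance (land : List (List Int)) (out : Int) : Decidable (Spec_solution land out) := by unfold Spec_solution; infer_instance

-- ===== CLAIM (what is proved, stated in full; the proofs are below) =====
def Claim_equal_solution : Prop := ∀ (land : List (List Int)), Dom_solution land → Pre_solution land → Spec_solution land (solution land)

-- ===== LEMMAS AND PROOFS =====

-- size as the ports spell it equals size as Pre_solution spells it
theorem pvSize_eq (l : List (List Int)) :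
    (PySem.List.pyGetD l 0 []).length = (l.headD []).length := by
  cases l <;> simp [PySem.List.pyGetD_zero, List.getD]

-- The simulation invariant tying A's mutated grid to B's visited set:
-- same shape as the original grid, and a cell in scope reads 0 iff it was visited or originally 0.
def pvRel (land0 g : List (List Int)) (seen : PySem.Set (Int × Int)) : Prop :=
  g.length = land0.length ∧
  (∀ j : Nat, (g.getD j []).length = (land0.getD j []).length) ∧
  (∀ j i : Int, 0 ≤ j → j < (land0.length : Int) → 0 ≤ i →
    i < ((PySem.List.pyGetD land0 0 []).length : Int) →
    pvCell g j i = if PySem.Set.contains seen (j, i) then 0 else pvCell land0 j i)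

-- invariant tying the two inner-loop states together (k = B's cursor)
def pvStRel (land0 : List (List Int)) (k : Nat)
    (stA : List (List Int) × List (Int × Int) × PySem.Set Int × Int)
    (stB : PySem.Set (Int × Int) × List (Int × Int)) : Prop :=
  pvRel land0 stA.1 stB.1 ∧ stA.2.1 = stB.2.drop k ∧
  stA.2.2.1 = PySem.Set.ofList (stB.2.map Prod.snd) ∧
  stA.2.2.2 = (stB.2.length : Int) ∧ k ≤ stB.2.length

theorem pvContains_add {a : Type} [BEq a] [LawfulBEq a] (s : PySem.Set a) (x y : a) :
    PySem.Set.contains (PySem.Set.add s x) y = (PySem.Set.contains s y || y == x) := by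
  rw [PySem.Set.add_eq_ite]
  split_ifs with h
  · by_cases hyx : y = x
    · subst hyx
      rw [(PySem.Set.contains_iff s y).2 h]
      simp
    · simp [hyx]
  · by_cases hyx : y = x
    · subst hyx
      simp [PySem.Set.contains_eq_listContains]
    · simp [PySem.Set.contains_eq_listContains, hyx]

theorem pvCell_toNat (g : List (List Int)) (j i : Int) (hj : 0 ≤ j) (hi : 0 ≤ i) :
    pvCell g j i = (g.getD j.toNat []).getD i.toNat 0 := by
  unfold pvCell
  conv_lhs => rw [← Int.toNat_of_nonneg hj, ← Int.toNat_of_nonneg hi]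
  simp only [PySem.List.pyGetD_natCast]

theorem pvZero_toNat (g : List (List Int)) (j i : Int) (hj : 0 ≤ j) (hi : 0 ≤ i) :
    pvZero g j i = g.set j.toNat ((g.getD j.toNat []).set i.toNat 0) := by
  unfold pvZero
  conv_lhs => rw [← Int.toNat_of_nonneg hj, ← Int.toNat_of_nonneg hi]
  simp only [PySem.List.pySetD_natCast, PySem.List.pyGetD_natCast]

theorem pvGetD_set (g : List (List Int)) (a j : Nat) (r : List Int) :
    (g.set a r).getD j [] = if a = j ∧ a < g.length then r else g.getD j [] := by
  simp only [List.getD_eq_getElem?_getD, List.getElem?_set]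
  split_ifs <;> first | rfl | (exfalso; omega) | simp_all

theorem pvGetD_set_elt (r : List Int) (b i : Nat) (v : Int) :
    (r.set b v).getD i 0 = if b = i ∧ b < r.length then v else r.getD i 0 := by
  simp only [List.getD_eq_getElem?_getD, List.getElem?_set]
  split_ifs <;> first | rfl | (exfalso; omega) | simp_all

theorem pvRowLen (land0 : List (List Int)) (hPre : Pre_solution land0) (a : Nat)
    (ha : a < land0.length) :
    (PySem.List.pyGetD land0 0 []).length ≤ (land0.getD a []).length := by
  rw [pvSize_eq]
  have hget : land0.getD a [] = land0[a] := by
    simp [List.getD_eq_getElem?_getD, List.getElem?_eq_getElem ha]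
  rw [hget]
  exact hPre.2.2 _ (List.getElem_mem ha)

theorem pvRel_zero_add (land0 g : List (List Int)) (seen : PySem.Set (Int × Int)) (j i : Int)
    (hRel : pvRel land0 g seen) (hPre : Pre_solution land0)
    (hj0 : 0 ≤ j) (hj : j < (land0.length : Int))
    (hi0 : 0 ≤ i) (hi : i < ((PySem.List.pyGetD land0 0 []).length : Int)) :
    pvRel land0 (pvZero g j i) (PySem.Set.add seen (j, i)) := by
  obtain ⟨hlen, hrows, hcell⟩ := hRel
  have hjN : j.toNat < land0.length := by omega
  have hiN : i.toNat < (PySem.List.pyGetD land0 0 []).length := by omega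
  have hrow : i.toNat < (g.getD j.toNat []).length := by
    rw [hrows j.toNat]
    exact lt_of_lt_of_le hiN (pvRowLen land0 hPre j.toNat hjN)
  rw [pvZero_toNat g j i hj0 hi0]
  refine ⟨by simpa using hlen, ?_, ?_⟩
  · intro a
    rw [pvGetD_set]
    split_ifs with h
    · rw [List.length_set, hrows j.toNat, h.1]
    · exact hrows a
  · intro j' i' hj'0 hj' hi'0 hi'
    have hj'N : j'.toNat < land0.length := by omega
    rw [pvCell_toNat _ _ _ hj'0 hi'0, pvGetD_set, pvContains_add]
    by_cases hjj : j.toNat = j'.toNat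
    · rw [if_pos ⟨hjj, by omega⟩, hjj, pvGetD_set_elt]
      by_cases hii : i.toNat = i'.toNat
      · have hpq : ((j' : Int), (i' : Int)) = (j, i) := by
          have h1 : j' = j := by omega
          have h2 : i' = i := by omega
          rw [h1, h2]
        rw [if_pos ⟨hii, by rw [← hjj]; exact hrow⟩, hpq]
        simp
      · rw [if_neg (fun hc => hii hc.1), ← pvCell_toNat g j' i' hj'0 hi'0,
          hcell j' i' hj'0 hj' hi'0 hi']
        have hne : ((j' : Int), (i' : Int)) ≠ (j, i) := by
          intro hc
          have h2 := congrArg Prod.snd hc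
          simp only at h2
          omega
        simp [hne]
    · rw [if_neg (fun hc => hjj hc.1), ← pvCell_toNat g j' i' hj'0 hi'0,
        hcell j' i' hj'0 hj' hi'0 hi']
      have hne : ((j' : Int), (i' : Int)) ≠ (j, i) := by
        intro hc
        have h1 := congrArg Prod.fst hc
        simp only at h1
        omega
      simp [hne]

theorem pvStep_corr (land0 : List (List Int)) (k : Nat) (b d p : Int × Int)
    (stA : List (List Int) × List (Int × Int) × PySem.Set Int × Int)
    (stB : PySem.Set (Int × Int) × List (Int × Int))
    (hp1 : p.1 = b.1 + d.2) (hp2 : p.2 = b.2 + d.1)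
    (hRel : pvStRel land0 k stA stB) (hPre : Pre_solution land0) :
    pvStRel land0 k
      (pvStepA ((PySem.List.pyGetD land0 0 []).length : Int) (land0.length : Int) b stA d)
      (pvStepB land0 ((PySem.List.pyGetD land0 0 []).length : Int) (land0.length : Int) stB p) := by
  obtain ⟨g, q, rows, oils⟩ := stA
  obtain ⟨seen, comp⟩ := stB
  obtain ⟨hrel, hq, hrows, hoils, hk⟩ := hRel
  dsimp only at hrel hq hrows hoils hk
  simp only [pvStepA, pvStepB]
  rw [← hp1, ← hp2]
  by_cases hbnd : 0 ≤ p.1 ∧ p.1 < (land0.length : Int) ∧ 0 ≤ p.2 ∧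
      p.2 < ((PySem.List.pyGetD land0 0 []).length : Int)
  · rw [if_neg (by omega)]
    have hcell := hrel.2.2 p.1 p.2 hbnd.1 hbnd.2.1 hbnd.2.2.1 hbnd.2.2.2
    have hpair : (p.1, p.2) = p := rfl
    rw [hpair] at hcell
    have hat : pvAt land0 p = pvCell land0 p.1 p.2 := rfl
    by_cases hseen : PySem.Set.contains seen p = true
    · have hz : pvCell g p.1 p.2 = 0 := by rw [hcell, if_pos hseen]
      rw [if_neg (by simp [hz])]
      rw [if_neg (fun hc => hc.2.2 hseen)]
      exact ⟨hrel, hq, hrows, hoils, hk⟩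
    · have hz : pvCell g p.1 p.2 = pvCell land0 p.1 p.2 := by rw [hcell, if_neg hseen]
      by_cases hval : pvCell land0 p.1 p.2 = 0
      · rw [if_neg (by simp [hz, hval])]
        rw [if_neg (by simp [hat, hval])]
        exact ⟨hrel, hq, hrows, hoils, hk⟩
      · rw [if_pos (by simp [hz, hval])]
        rw [if_pos ⟨hbnd, by rw [hat]; exact hval, hseen⟩]
        refine ⟨?_, ?_, ?_, ?_, ?_⟩
        · have hz' := pvRel_zero_add land0 g seen p.1 p.2 hrel hPre
            hbnd.1 hbnd.2.1 hbnd.2.2.1 hbnd.2.2.2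
          rwa [hpair] at hz'
        · dsimp only
          rw [hq, List.drop_append_of_le_length hk]
        · dsimp only
          rw [hrows]
          simp [PySem.Set.ofList_append_singleton]
        · dsimp only
          rw [hoils]
          simp
        · dsimp only
          simp
          omega
  · rw [if_pos (by omega)]
    rw [if_neg (fun hc => hbnd hc.1)]
    exact ⟨hrel, hq, hrows, hoils, hk⟩

theorem pvFold_corr (land0 : List (List Int)) (k : Nat) (b : Int × Int)
    (stA : List (List Int) × List (Int × Int) × PySem.Set Int × Int)
    (stB : PySem.Set (Int × Int) × List (Int × Int))
    (hRel : pvStRel land0 k stA stB) (hPre : Pre_solution land0) :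
    pvStRel land0 k
      (pvDxDy.foldl (pvStepA ((PySem.List.pyGetD land0 0 []).length : Int) (land0.length : Int) b) stA)
      ((pvNbrs b.1 b.2).foldl (pvStepB land0 ((PySem.List.pyGetD land0 0 []).length : Int) (land0.length : Int)) stB) := by
  simp only [pvDxDy, pvNbrs, List.foldl_cons, List.foldl_nil]
  refine pvStep_corr land0 k b (0, -1) _ _ _ (by dsimp only; try ring) (by dsimp only; try ring) ?_ hPre
  refine pvStep_corr land0 k b (0, 1) _ _ _ (by dsimp only; try ring) (by dsimp only; try ring) ?_ hPre
  refine pvStep_corr land0 k b (-1, 0) _ _ _ (by dsimp only; try ring) (by dsimp only; try ring) ?_ hPre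
  exact pvStep_corr land0 k b (1, 0) _ _ _ (by dsimp only; try ring) (by dsimp only; try ring) hRel hPre

theorem pvWhile_corr (land0 : List (List Int)) (hPre : Pre_solution land0) (fuel : Nat) :
    ∀ (k : Nat) (stA : List (List Int) × List (Int × Int) × PySem.Set Int × Int)
      (stB : PySem.Set (Int × Int) × List (Int × Int)),
    pvStRel land0 k stA stB →
    ∃ g' rows' oils' seen' comp',
      pvWhileA ((PySem.List.pyGetD land0 0 []).length : Int) (land0.length : Int) fuel stA = (g', rows', oils') ∧
      pvWhileB land0 ((PySem.List.pyGetD land0 0 []).length : Int) (land0.length : Int) fuel stB k = (seen', comp') ∧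
      rows' = PySem.Set.ofList (comp'.map Prod.snd) ∧ oils' = (comp'.length : Int) ∧
      pvRel land0 g' seen' := by
  induction fuel with
  | zero =>
    intro k stA stB h
    exact ⟨stA.1, stA.2.2.1, stA.2.2.2, stB.1, stB.2, rfl, rfl, h.2.2.1, h.2.2.2.1, h.1⟩
  | succ f ih =>
    intro k stA stB h
    obtain ⟨g, q, rows, oils⟩ := stA
    obtain ⟨seen, comp⟩ := stB
    obtain ⟨hrel, hq, hrows, hoils, hk⟩ := h
    dsimp only at hrel hq hrows hoils hk
    subst hq
    by_cases hlt : k < comp.length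
    · have hcons : comp.drop k = comp[k] :: comp.drop (k + 1) := List.drop_eq_getElem_cons hlt
      rw [hcons]
      have hA : pvWhileA ((PySem.List.pyGetD land0 0 []).length : Int) (land0.length : Int) (f + 1)
          (g, comp[k] :: comp.drop (k + 1), rows, oils) =
          pvWhileA ((PySem.List.pyGetD land0 0 []).length : Int) (land0.length : Int) f
            (pvDxDy.foldl (pvStepA ((PySem.List.pyGetD land0 0 []).length : Int) (land0.length : Int) comp[k])
              (g, comp.drop (k + 1), rows, oils)) := rfl
      have hB : pvWhileB land0 ((PySem.List.pyGetD land0 0 []).length : Int) (land0.length : Int) (f + 1)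
          (seen, comp) k =
          pvWhileB land0 ((PySem.List.pyGetD land0 0 []).length : Int) (land0.length : Int) f
            ((pvNbrs comp[k].1 comp[k].2).foldl
              (pvStepB land0 ((PySem.List.pyGetD land0 0 []).length : Int) (land0.length : Int)) (seen, comp)) (k + 1) := by
        rw [pvWhileB]
        simp [hlt]
      rw [hA, hB]
      exact ih (k + 1)
        (pvDxDy.foldl (pvStepA ((PySem.List.pyGetD land0 0 []).length : Int) (land0.length : Int) comp[k])
          (g, comp.drop (k + 1), rows, oils))
        ((pvNbrs comp[k].1 comp[k].2).foldl
          (pvStepB land0 ((PySem.List.pyGetD land0 0 []).length : Int) (land0.length : Int)) (seen, comp))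
        (pvFold_corr land0 (k + 1) comp[k] _ _ ⟨hrel, rfl, hrows, hoils, hlt⟩ hPre)
    · have hnil : comp.drop k = [] := List.drop_eq_nil_of_le (by omega)
      rw [hnil]
      have hA : pvWhileA ((PySem.List.pyGetD land0 0 []).length : Int) (land0.length : Int) (f + 1)
          (g, ([] : List (Int × Int)), rows, oils) = (g, rows, oils) := rfl
      have hB : pvWhileB land0 ((PySem.List.pyGetD land0 0 []).length : Int) (land0.length : Int) (f + 1)
          (seen, comp) k = (seen, comp) := by
        rw [pvWhileB]
        simp [hlt]
      exact ⟨g, rows, oils, seen, comp, hA, hB, hrows, hoils, hrel⟩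

theorem pvBody_corr (land0 : List (List Int)) (hPre : Pre_solution land0) (fuel : Nat) (i j : Int)
    (stA : List (List Int) × List Int) (stB : PySem.Set (Int × Int) × List Int)
    (hRel : pvRel land0 stA.1 stB.1) (ham : stA.2 = stB.2)
    (hi0 : 0 ≤ i) (hi : i < ((PySem.List.pyGetD land0 0 []).length : Int))
    (hj0 : 0 ≤ j) (hj : j < (land0.length : Int)) :
    pvRel land0
      (pvBodyA ((PySem.List.pyGetD land0 0 []).length : Int) (land0.length : Int) (fuel + 1) i stA j).1
      (pvBodyB land0 ((PySem.List.pyGetD land0 0 []).length : Int) (land0.length : Int) (fuel + 1) i stB j).1 ∧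
    (pvBodyA ((PySem.List.pyGetD land0 0 []).length : Int) (land0.length : Int) (fuel + 1) i stA j).2 =
      (pvBodyB land0 ((PySem.List.pyGetD land0 0 []).length : Int) (land0.length : Int) (fuel + 1) i stB j).2 := by
  obtain ⟨g, amount⟩ := stA
  obtain ⟨seen, totals⟩ := stB
  dsimp only at hRel ham
  subst ham
  simp only [pvBodyA, pvBodyB]
  have hcell := hRel.2.2 j i hj0 hj hi0 hi
  by_cases hskip : pvAt land0 (j, i) = 0 ∨ PySem.Set.contains seen (j, i) = true
  · have hz : pvCell g j i = 0 := by
      rcases hskip with h | h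
      · rw [hcell]
        split_ifs
        · rfl
        · exact h
      · rw [hcell, if_pos h]
    rw [if_pos hskip, if_neg (by simp [hz])]
    exact ⟨hRel, rfl⟩
  · rw [not_or] at hskip
    obtain ⟨hnz, hns⟩ := hskip
    rw [if_neg (show ¬(pvAt land0 (j, i) = 0 ∨ PySem.Set.contains seen (j, i) = true) from
      fun hc => hc.elim hnz hns)]
    have hnz' : ¬pvCell g j i = 0 := by rw [hcell, if_neg hns]; exact hnz
    rw [if_pos hnz']
    have hst0 : pvStRel land0 0
        (pvZero g j i, [(j, i)], PySem.Set.add PySem.Set.empty i, (1 : Int))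
        (PySem.Set.add seen (j, i), [(j, i)]) := by
      exact ⟨pvRel_zero_add land0 g seen j i hRel hPre hj0 hj hi0 hi, rfl, rfl, by simp, by simp⟩
    obtain ⟨g', rows', oils', seen', comp', hA, hB, hro, hoi, hre⟩ :=
      pvWhile_corr land0 hPre (fuel + 1) 0 _ _ hst0
    rw [hA, hB]
    dsimp only
    rw [hro, hoi]
    exact ⟨hre, rfl⟩

theorem pvFoldJ_corr (land0 : List (List Int)) (hPre : Pre_solution land0) (fuel : Nat) (i : Int)
    (hi0 : 0 ≤ i) (hi : i < ((PySem.List.pyGetD land0 0 []).length : Int)) :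
    ∀ (js : List Int), (∀ j ∈ js, 0 ≤ j ∧ j < (land0.length : Int)) →
    ∀ (stA : List (List Int) × List Int) (stB : PySem.Set (Int × Int) × List Int),
    pvRel land0 stA.1 stB.1 → stA.2 = stB.2 →
    pvRel land0
      (js.foldl (pvBodyA ((PySem.List.pyGetD land0 0 []).length : Int) (land0.length : Int) (fuel + 1) i) stA).1
      (js.foldl (pvBodyB land0 ((PySem.List.pyGetD land0 0 []).length : Int) (land0.length : Int) (fuel + 1) i) stB).1 ∧
    (js.foldl (pvBodyA ((PySem.List.pyGetD land0 0 []).length : Int) (land0.length : Int) (fuel + 1) i) stA).2 =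
      (js.foldl (pvBodyB land0 ((PySem.List.pyGetD land0 0 []).length : Int) (land0.length : Int) (fuel + 1) i) stB).2 := by
  intro js
  induction js with
  | nil => intro _ stA stB h1 h2; exact ⟨h1, h2⟩
  | cons j t iht =>
    intro hbound stA stB h1 h2
    simp only [List.foldl_cons]
    have hb := pvBody_corr land0 hPre fuel i j stA stB h1 h2 hi0 hi
      (hbound j List.mem_cons_self).1 (hbound j List.mem_cons_self).2
    exact iht (fun x hx => hbound x (List.mem_cons_of_mem _ hx)) _ _ hb.1 hb.2

theorem pvFoldI_corr (land0 : List (List Int)) (hPre : Pre_solution land0) (fuel : Nat) :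
    ∀ (is : List Int), (∀ i ∈ is, 0 ≤ i ∧ i < ((PySem.List.pyGetD land0 0 []).length : Int)) →
    ∀ (stA : List (List Int) × List Int) (stB : PySem.Set (Int × Int) × List Int),
    pvRel land0 stA.1 stB.1 → stA.2 = stB.2 →
    pvRel land0
      (is.foldl (fun st i => (PySem.List.pyRange 0 (land0.length : Int) 1).foldl
        (pvBodyA ((PySem.List.pyGetD land0 0 []).length : Int) (land0.length : Int) (fuel + 1) i) st) stA).1
      (is.foldl (fun st i => (PySem.List.pyRange 0 (land0.length : Int) 1).foldl
        (pvBodyB land0 ((PySem.List.pyGetD land0 0 []).length : Int) (land0.length : Int) (fuel + 1) i) st) stB).1 ∧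
    (is.foldl (fun st i => (PySem.List.pyRange 0 (land0.length : Int) 1).foldl
        (pvBodyA ((PySem.List.pyGetD land0 0 []).length : Int) (land0.length : Int) (fuel + 1) i) st) stA).2 =
      (is.foldl (fun st i => (PySem.List.pyRange 0 (land0.length : Int) 1).foldl
        (pvBodyB land0 ((PySem.List.pyGetD land0 0 []).length : Int) (land0.length : Int) (fuel + 1) i) st) stB).2 := by
  intro is
  induction is with
  | nil => intro _ stA stB h1 h2; exact ⟨h1, h2⟩
  | cons i t iht =>
    intro hbound stA stB h1 h2
    simp only [List.foldl_cons]
    have hin := pvFoldJ_corr land0 hPre fuel i (hbound i List.mem_cons_self).1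
      (hbound i List.mem_cons_self).2 (PySem.List.pyRange 0 (land0.length : Int) 1)
      (fun j hj => by rw [PySem.List.mem_pyRange_one] at hj; exact hj) stA stB h1 h2
    exact iht (fun x hx => hbound x (List.mem_cons_of_mem _ hx)) _ _ hin.1 hin.2

-- ===== VERDICT (by name: the statement is the Claim_ definition above) =====
theorem solution_spec : Claim_equal_solution := by
  unfold Claim_equal_solution
  intro land _ hPre
  unfold Spec_solution
  simp only [solution, solution_alt]
  have hinit : pvRel land land (PySem.Set.empty : PySem.Set (Int × Int)) := by
    refine ⟨rfl, fun _ => rfl, ?_⟩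
    intro j i _ _ _ _
    have hc : PySem.Set.contains (PySem.Set.empty : PySem.Set (Int × Int)) (j, i) = false := rfl
    rw [hc]
    simp
  have h := pvFoldI_corr land hPre (land.length * (PySem.List.pyGetD land 0 []).length)
    (PySem.List.pyRange 0 ((PySem.List.pyGetD land 0 []).length : Int) 1)
    (fun i hi => by rw [PySem.List.mem_pyRange_one] at hi; exact hi)
    (land, List.replicate (PySem.List.pyGetD land 0 []).length (0 : Int))
    (PySem.Set.empty, List.replicate (PySem.List.pyGetD land 0 []).length (0 : Int))
    hinit rfl
  rw [h.2]
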